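-- pv_equiv track=rewrite | github.com/ALEXJI19991007/LJNTraining | HashTable.py | is_valid_string
-- ===== SOURCE A (Python) =====
-- def is_valid_string(num_string: str):
--     num_string_arr = num_string.split(",")
--     occurrence = {}
--     for num in num_string_arr:
--         if num not in occurrence:
--             occurrence[num] = 0
--         occurrence[num] += 1
--     has_pair = False
--     for entry in occurrence.items():
--         if entry[1] % 3 == 0:
--             continue
--         elif entry[1] == 2 and not has_pair:
--             has_pair = True
--         elif entry[1] % 3 == 2 and not has_pair:
--             has_pair = True
--         else:
--             return False
--     return has_pair
-- ===== SOURCE B (Python) =====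
-- def is_valid_string(num_string: str):
--     toks = sorted(num_string.split(","))
--     pairs = 0
--     singles = 0
--     i = 0
--     n = len(toks)
--     while i < n:
--         j = i + 1
--         while j < n and toks[j] == toks[i]:
--             j += 1
--         r = (j - i) % 3
--         if r == 2:
--             pairs += 1
--         elif r == 1:
--             singles += 1
--         i = j
--     return pairs == 1 and singles == 0
-- ===== Notes on version B (the rewrite author's own statement) =====
-- stated objective: alternative
-- what changed: Drops the hash-map counting entirely: B sorts the tokens and scans equal runs with two pointers, counting runs whose length is 2 resp. 1 mod 3; accepts iff exactly one 2-run and no 1-run.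
import Mathlib
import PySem

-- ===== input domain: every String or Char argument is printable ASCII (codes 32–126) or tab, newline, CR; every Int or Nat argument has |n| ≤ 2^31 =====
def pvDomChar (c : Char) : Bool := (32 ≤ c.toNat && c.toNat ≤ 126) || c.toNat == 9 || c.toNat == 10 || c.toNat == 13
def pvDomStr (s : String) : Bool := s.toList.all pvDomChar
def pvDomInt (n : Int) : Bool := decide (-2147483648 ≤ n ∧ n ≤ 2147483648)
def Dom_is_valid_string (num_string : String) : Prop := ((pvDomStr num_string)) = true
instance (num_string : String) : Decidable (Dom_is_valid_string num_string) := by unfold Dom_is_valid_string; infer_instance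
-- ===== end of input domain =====

-- B drops A's hash-map counting: it sorts the tokens and scans equal runs with
-- two pointers, classifying each run length mod 3 (objective: alternative).

-- ===== PORT A =====
-- counting loop body: 'if num not in occurrence: occurrence[num] = 0; occurrence[num] += 1'
def avStep (d : PySem.Dict String Int) (num : String) : PySem.Dict String Int :=
  let d' := if d.contains num then d else d.insert num 0
  d'.modify num 0 (· + 1)

-- validation loop over occurrence.items() with the has_pair flag and early 'return False'
def avLoop : List (String × Int) → Bool → Bool
  | [], has_pair => has_pair
  | entry :: rest, has_pair =>
    if PySem.Int.mod entry.2 3 == 0 then avLoop rest has_pair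
    else if entry.2 == 2 && !has_pair then avLoop rest true
    else if PySem.Int.mod entry.2 3 == 2 && !has_pair then avLoop rest true
    else false

def is_valid_string (num_string : String) : Bool :=
  let num_string_arr := (PySem.Str.split? num_string ",").getD []
  let occurrence := num_string_arr.foldl avStep PySem.Dict.empty
  avLoop occurrence.items false

-- ===== PORT B =====
-- the outer while: scan one run of equal tokens (the inner while = takeWhile),
-- classify its length mod 3, continue after the run
def altLoop : List String → Int → Int → Int × Int
  | [], pairs, singles => (pairs, singles)
  | x :: rest, pairs, singles =>
    let run := rest.takeWhile (fun y => y == x)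
    let r := PySem.Int.mod (1 + run.length) 3
    let rest' := rest.dropWhile (fun y => y == x)
    if r == 2 then altLoop rest' (pairs + 1) singles
    else if r == 1 then altLoop rest' pairs (singles + 1)
    else altLoop rest' pairs singles
termination_by l _ _ => l.length
decreasing_by
  all_goals
    simp only [List.length_cons]
    exact Nat.lt_succ_of_le (List.length_dropWhile_le _ _)

def is_valid_string_alt (num_string : String) : Bool :=
  let toks := PySem.List.sorted ((PySem.Str.split? num_string ",").getD []) (fun x => x) false
  let res := altLoop toks 0 0
  res.1 == 1 && res.2 == 0

-- ===== PRECONDITION & SPEC =====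
def Spec_is_valid_string (num_string : String) (out : Bool) : Prop := out = is_valid_string_alt num_string
instance (num_string : String) (out : Bool) : Decidable (Spec_is_valid_string num_string out) := by unfold Spec_is_valid_string; infer_instance

-- ===== CLAIM =====
def Claim_equal_is_valid_string : Prop := ∀ (num_string : String), Dom_is_valid_string num_string → Spec_is_valid_string num_string (is_valid_string num_string)

-- ===== LEMMAS AND PROOFS =====

lemma get?_mk_append_last (l : List (String × Int)) (x : String) (v : Int)
    (h : ∀ p ∈ l, p.1 ≠ x) :
    (PySem.Dict.mk (l ++ [(x, v)])).get? x = some v := by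
  induction l with
  | nil =>
    rw [List.nil_append, PySem.Dict.get?_mk_cons]
    simp
  | cons p rest ih =>
    obtain ⟨k, w⟩ := p
    rw [List.cons_append, PySem.Dict.get?_mk_cons]
    have hk : k ≠ x := h (k, w) (by simp)
    simp only [beq_iff_eq, hk, if_false]
    exact ih (fun q hq => h q (by simp [hq]))

-- Inserting 0 for a missing key and then incrementing in place is one counter step.
lemma avStep_insert_missing (d : PySem.Dict String Int) (x : String)
    (h : d.contains x = false) :
    (d.insert x 0).modify x 0 (· + 1) = d.modify x 0 (· + 1) := by
  have hany : (d.items.any fun p => p.1 == x) = false := by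
    simpa [PySem.Dict.contains] using h
  have hmem : ∀ p ∈ d.items, p.1 ≠ x := by
    intro p hp
    have := List.any_eq_false.mp hany p hp
    simpa using this
  have hg1 : PySem.Dict.getD (PySem.Dict.mk (d.items ++ [(x, (0 : Int))])) x 0 = 0 := by
    rw [PySem.Dict.getD_eq_get?_getD, get?_mk_append_last d.items x 0 hmem]
    rfl
  have hg2 : d.getD x 0 = 0 := PySem.Dict.getD_of_not_contains d 0 h
  have hid : (d.items.map fun p => if p.1 = x then (x, (1 : Int)) else p) = d.items := by
    rw [List.map_congr_left (g := id) ?_, List.map_id]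
    intro p hp
    simp [hmem p hp]
  have hany2 : ((d.items ++ [(x, (0 : Int))]).any fun p => p.1 == x) = true := by
    simp
  ext1
  simp only [PySem.Dict.insert, PySem.Dict.modify, PySem.Dict.contains, hany, hany2,
    Bool.false_eq_true, if_false, if_true, hg1, hg2]
  rw [List.map_append]
  simp [hid]

lemma avStep_eq (d : PySem.Dict String Int) (x : String) :
    avStep d x = d.modify x 0 (· + 1) := by
  by_cases h : d.contains x
  · simp [avStep, h]
  · simp only [Bool.not_eq_true] at h
    simp [avStep, h, avStep_insert_missing d x h]

lemma avFold_eq (l : List String) :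
    l.foldl avStep PySem.Dict.empty = PySem.Dict.counter l := by
  have hstep : avStep = fun (d : PySem.Dict String Int) x => d.modify x 0 (· + 1) :=
    funext fun d => funext fun x => avStep_eq d x
  rw [hstep, PySem.Dict.counter_eq_foldl]

-- A's validation loop computes the closed remainder predicate.
lemma avLoop_eq (l : List (String × Int)) (hp : Bool) :
    avLoop l hp =
      (((l.map fun e => PySem.Int.mod e.2 3).count 2 == (if hp then 0 else 1)) &&
       ((l.map fun e => PySem.Int.mod e.2 3).count 1 == 0)) := by
  induction l generalizing hp with
  | nil => cases hp <;> simp [avLoop]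
  | cons e rest ih =>
    have h0 : 0 ≤ PySem.Int.mod e.2 3 := PySem.Int.mod_nonneg _ (by norm_num)
    have h3 : PySem.Int.mod e.2 3 < 3 := PySem.Int.mod_lt _ (by norm_num)
    have hcases : PySem.Int.mod e.2 3 = 0 ∨ PySem.Int.mod e.2 3 = 1 ∨ PySem.Int.mod e.2 3 = 2 := by
      omega
    rcases hcases with hm | hm | hm
    · have hstep : avLoop (e :: rest) hp = avLoop rest hp := by
        simp only [avLoop, hm]
        norm_num
      rw [hstep, ih, List.map_cons, hm]
      rw [Bool.eq_iff_iff]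
      cases hp <;> simp
    · have hne2 : e.2 ≠ 2 := by
        intro he
        rw [he] at hm
        exact absurd hm (by decide)
      have hstep : avLoop (e :: rest) hp = false := by
        simp only [avLoop, hm]
        simp [hne2]
      rw [hstep, List.map_cons, hm]
      rw [Bool.eq_iff_iff]
      simp
    · have hstep : avLoop (e :: rest) hp = (if hp then false else avLoop rest true) := by
        cases hp <;> by_cases he : e.2 = 2 <;> simp only [avLoop, hm] <;> simp [he]
      rw [hstep, List.map_cons, hm]
      cases hp
      · rw [if_neg (by simp), ih]
        rw [Bool.eq_iff_iff]
        simp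
      · rw [if_pos rfl]
        rw [Bool.eq_iff_iff]
        simp

-- the first token of each run of the sorted list
def runHeads : List String → List String
  | [] => []
  | x :: rest => x :: runHeads (rest.dropWhile (fun y => y == x))
termination_by l => l.length
decreasing_by
  simp only [List.length_cons]
  exact Nat.lt_succ_of_le (List.length_dropWhile_le _ _)

lemma mem_runHeads (l : List String) (y : String) : y ∈ runHeads l ↔ y ∈ l := by
  induction l using runHeads.induct with
  | case1 => simp [runHeads]
  | case2 x rest ih =>
    rw [runHeads, List.mem_cons, List.mem_cons, ih]
    constructor
    · rintro (h | h)
      · exact Or.inl h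
      · exact Or.inr ((List.dropWhile_sublist _).mem h)
    · rintro (h | h)
      · exact Or.inl h
      · by_cases hx : y = x
        · exact Or.inl hx
        · right
          have hsplit : rest.takeWhile (fun z => z == x) ++ rest.dropWhile (fun z => z == x)
              = rest := List.takeWhile_append_dropWhile
          rw [← hsplit, List.mem_append] at h
          rcases h with h' | h'
          · exact absurd (by simpa using List.mem_takeWhile_imp h') hx
          · exact h'

-- in a sorted list, no copy of the head survives past its run
lemma not_mem_dropWhile_sorted (x : String) (rest : List String)
    (hs : (x :: rest).Pairwise (· ≤ ·)) :
    x ∉ rest.dropWhile (fun y => y == x) := by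
  intro hxmem
  cases hd : rest.dropWhile (fun y => y == x) with
  | nil => rw [hd] at hxmem; exact absurd hxmem (List.not_mem_nil)
  | cons h t =>
    have hne : rest.dropWhile (fun y => y == x) ≠ [] := by rw [hd]; simp
    have hh : (h == x) = false := by
      have := List.head_dropWhile_not (fun y => y == x) hne
      simpa [hd] using this
    have hhx : h ≠ x := by simpa using hh
    have hhmem : h ∈ rest := (List.dropWhile_sublist _).mem (by rw [hd]; exact List.mem_cons_self)
    have hxle : x ≤ h := (List.pairwise_cons.mp hs).1 h hhmem
    have hdw : (h :: t).Pairwise (· ≤ ·) := by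
      rw [← hd]
      exact ((List.pairwise_cons.mp hs).2).sublist (List.dropWhile_sublist _)
    rw [hd] at hxmem
    rcases List.mem_cons.mp hxmem with h1 | h1
    · exact hhx h1.symm
    · exact hhx (le_antisymm ((List.pairwise_cons.mp hdw).1 x h1) hxle)

lemma sorted_tail_facts (x : String) (rest : List String)
    (hs : (x :: rest).Pairwise (· ≤ ·)) :
    (rest.dropWhile (fun y => y == x)).Pairwise (· ≤ ·) ∧
    x ∉ rest.dropWhile (fun y => y == x) ∧
    (rest.takeWhile (fun y => y == x)).length = rest.count x := by
  have hrest : rest.Pairwise (· ≤ ·) := (List.pairwise_cons.mp hs).2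
  refine ⟨hrest.sublist (List.dropWhile_sublist _), not_mem_dropWhile_sorted x rest hs, ?_⟩
  have htw : ∀ z ∈ rest.takeWhile (fun y => y == x), z = x := by
    intro z hz
    simpa using List.mem_takeWhile_imp hz
  have hcnt : (rest.takeWhile (fun y => y == x)).count x
      = (rest.takeWhile (fun y => y == x)).length := by
    apply List.count_eq_length.mpr
    intro z hz
    exact (htw z hz).symm
  have hdwcnt : (rest.dropWhile (fun y => y == x)).count x = 0 := by
    rw [List.count_eq_zero]
    exact not_mem_dropWhile_sorted x rest hs
  have hsplit : rest.takeWhile (fun y => y == x) ++ rest.dropWhile (fun y => y == x) = rest :=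
    List.takeWhile_append_dropWhile
  have := congrArg (List.count x) hsplit
  rw [List.count_append, hcnt, hdwcnt] at this
  omega

lemma nodup_runHeads (l : List String) (hs : l.Pairwise (· ≤ ·)) :
    (runHeads l).Nodup := by
  induction l using runHeads.induct with
  | case1 => simp [runHeads]
  | case2 x rest ih =>
    obtain ⟨hdw, hx, -⟩ := sorted_tail_facts x rest hs
    rw [runHeads]
    refine List.nodup_cons.mpr ⟨?_, ih hdw⟩
    rw [mem_runHeads]
    exact hx

-- B's scan computes, over the run heads, how many distinct tokens have
-- count ≡ 2 resp. ≡ 1 (mod 3).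
lemma altLoop_eq (l : List String) (hs : l.Pairwise (· ≤ ·)) (p q : Int) :
    altLoop l p q =
      (p + (((runHeads l).map fun y => PySem.Int.mod (l.count y) 3).count 2 : Int),
       q + (((runHeads l).map fun y => PySem.Int.mod (l.count y) 3).count 1 : Int)) := by
  induction l using runHeads.induct generalizing p q with
  | case1 => simp [altLoop, runHeads]
  | case2 x rest ih =>
    obtain ⟨hdw, hxnot, hlen⟩ := sorted_tail_facts x rest hs
    -- run length = count of x in the whole list
    have hcx : ((x :: rest).count x : Int)
        = 1 + ((rest.takeWhile (fun y => y == x)).length : Int) := by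
      rw [List.count_cons_self, hlen]
      push_cast
      ring
    -- counts of the surviving heads are unchanged by removing the x-run
    have hmap : ((runHeads (rest.dropWhile (fun y => y == x))).map
          fun y => PySem.Int.mod ((x :: rest).count y) 3)
        = ((runHeads (rest.dropWhile (fun y => y == x))).map
          fun y => PySem.Int.mod ((rest.dropWhile (fun y => y == x)).count y) 3) := by
      apply List.map_congr_left
      intro y hy
      have hyt : y ∈ rest.dropWhile (fun y => y == x) := (mem_runHeads _ y).mp hy
      have hyx : y ≠ x := fun h => hxnot (h ▸ hyt)
      have h1 : (x :: rest).count y = rest.count y := List.count_cons_of_ne hyx.symm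
      have hsplit : rest.takeWhile (fun z => z == x) ++ rest.dropWhile (fun z => z == x)
          = rest := List.takeWhile_append_dropWhile
      have h2 : (rest.takeWhile (fun z => z == x)).count y = 0 := by
        rw [List.count_eq_zero]
        intro hmem
        exact hyx (by simpa using List.mem_takeWhile_imp hmem)
      have h3 : rest.count y = (rest.dropWhile (fun z => z == x)).count y := by
        have h4 := congrArg (List.count y) hsplit
        rw [List.count_append, h2] at h4
        omega
      rw [h1, h3]
    have hmod0 : 0 ≤ PySem.Int.mod (1 + ((rest.takeWhile (fun y => y == x)).length : Int)) 3 :=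
      PySem.Int.mod_nonneg _ (by norm_num)
    have hmod3 : PySem.Int.mod (1 + ((rest.takeWhile (fun y => y == x)).length : Int)) 3 < 3 :=
      PySem.Int.mod_lt _ (by norm_num)
    rw [altLoop, runHeads, List.map_cons, hcx, hmap]
    rcases (by omega :
        PySem.Int.mod (1 + ((rest.takeWhile (fun y => y == x)).length : Int)) 3 = 0 ∨
        PySem.Int.mod (1 + ((rest.takeWhile (fun y => y == x)).length : Int)) 3 = 1 ∨
        PySem.Int.mod (1 + ((rest.takeWhile (fun y => y == x)).length : Int)) 3 = 2) with hm | hm | hm <;>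
      · rw [hm]
        simp only [show ((0:Int) == 2) = false by decide, show ((1:Int) == 2) = false by decide,
          show ((2:Int) == 2) = true by decide, show ((0:Int) == 1) = false by decide,
          show ((1:Int) == 1) = true by decide, show ((2:Int) == 1) = false by decide,
          Bool.false_eq_true, if_true, if_false, ih hdw, List.count_cons, Prod.mk.injEq]
        constructor <;> push_cast <;> ring

-- ===== VERDICT (by name: the statement is the Claim_ definition above) =====
theorem is_valid_string_spec : Claim_equal_is_valid_string := by
  intro s _
  show is_valid_string s = is_valid_string_alt s
  simp only [is_valid_string, is_valid_string_alt]
  set xs := (PySem.Str.split? s ",").getD [] with hxs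
  set toks := PySem.List.sorted xs (fun x => x) false with htoks
  have hsorted : toks.Pairwise (· ≤ ·) := by
    simpa using PySem.List.sorted_pairwise (xs := xs) (key := fun x => x)
  have hperm : toks.Perm xs := PySem.List.sorted_perm xs (fun x => x) false
  rw [avFold_eq, avLoop_eq, PySem.Dict.items_counter, List.map_map,
      altLoop_eq toks hsorted 0 0]
  have hpermheads : (runHeads toks).Perm (PySem.Set.ofList xs) := by
    apply (List.perm_ext_iff_of_nodup (nodup_runHeads toks hsorted)
      (PySem.Set.nodup_ofList xs)).mpr
    intro y
    rw [mem_runHeads, PySem.Set.mem_ofList, hperm.mem_iff]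
  have hmapeq : ((runHeads toks).map fun y => PySem.Int.mod (toks.count y) 3)
      = ((runHeads toks).map fun y => PySem.Int.mod ((xs.count y : Int)) 3) := by
    apply List.map_congr_left
    intro y _
    rw [hperm.count_eq y]
  have h2 := ((hpermheads.map fun y => PySem.Int.mod ((xs.count y : Int)) 3).count_eq
    (2 : Int))
  have h1 := ((hpermheads.map fun y => PySem.Int.mod ((xs.count y : Int)) 3).count_eq
    (1 : Int))
  simp only [Function.comp_def, hmapeq, h2, h1]
  rw [Bool.eq_iff_iff]
  simp only [Bool.and_eq_true, beq_iff_eq, if_neg (by decide : ¬ (false = true))]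
  constructor <;> rintro ⟨ha, hb⟩ <;> exact ⟨by omega, by omega⟩
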